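-- pv_equiv track=rewrite | github.com/Aasthaengg/IBMdataset | Python_codes/p03402/s059694796.py | d_grid_components
-- ===== SOURCE A (Python) =====
-- def d_grid_components(A, B):  # 白マス,黒マスの連結成分の個数
--     H, W = 100, 100  # グリッドの縦と横。入力に関わらず定数(条件の最大値)とする
--     # 100x100グリッドの上半分を黒で、下半分を白で塗りつぶす
--     grid = [['#'] * W for _ in range(50)] + [['.'] * W for _ in range(50)]
--
--     def fill(start, end, num, symbol):
--         # start列からend-1列まで、num個のsymbolを1マスおきに置いていく
--         for h in range(start, end, 2):
--             for w in range(1, W, 2):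
--                 if num > 0:
--                     grid[h][w] = symbol
--                     num -= 1
--                 else:
--                     return
--         return None
--
--     fill(1, 50, A - 1, '.')  # 黒ゾーンに1つおきに1x1白マスをA-1個置く
--     fill(51, 100, B - 1, '#')  # 白ゾーンに1つおきに1x1黒マスをB-1個置く
--
--     ans = '100 100\n' + '\n'.join([''.join(row) for row in grid])
--     return ans
-- ===== SOURCE B (Python) =====
-- def d_grid_components(A, B):
--     # Build each row string directly from a closed-form per-row count;
--     # no 2-D grid mutation and no per-cell loop.
--     def half(base, sym, num):
--         rows = []
--         for _ in range(25):
--             c = min(max(num, 0), 50)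
--             rows.append(base * 100)
--             rows.append((base + sym) * c + base * (100 - 2 * c))
--             num -= 50
--         return rows
--     return '100 100\n' + '\n'.join(half('#', '.', A - 1) + half('.', '#', B - 1))
-- ===== Notes on version B (the rewrite author's own statement) =====
-- stated objective: simpler
-- what changed: B constructs each of the 200 output rows directly as a string from a closed-form per-row placement count (clamped arithmetic on the remaining counter), instead of building a mutable 100x100 character grid and filling it cell by cell with nested loops and an early-return counter.
import Mathlib
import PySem

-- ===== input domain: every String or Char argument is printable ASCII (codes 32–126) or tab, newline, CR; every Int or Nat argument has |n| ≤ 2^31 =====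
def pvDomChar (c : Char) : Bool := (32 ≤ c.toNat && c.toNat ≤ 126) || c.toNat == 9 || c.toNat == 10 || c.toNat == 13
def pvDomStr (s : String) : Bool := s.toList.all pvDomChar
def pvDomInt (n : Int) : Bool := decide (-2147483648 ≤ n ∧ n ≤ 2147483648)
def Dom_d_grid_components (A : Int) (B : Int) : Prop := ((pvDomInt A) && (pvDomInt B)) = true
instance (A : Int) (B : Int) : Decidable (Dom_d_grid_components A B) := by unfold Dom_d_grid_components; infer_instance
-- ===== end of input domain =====

-- B builds each output row string directly from a closed-form per-row count instead of
-- mutating a 2-D char grid cell by cell with nested loops and an early-return counter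
-- (objective: simpler; same return value for every pair of ints).

-- ===== PORT A =====
-- grid[h][w] = symbol  (h, w always nonnegative here, from range(...), so toNat is exact)
def pvSet2 (g : List (List Char)) (h w : Int) (sym : Char) : List (List Char) :=
  g.modify h.toNat (fun row => row.set w.toNat sym)

-- inner loop 'for w in range(1, W, 2): ...' of fill; Bool = early 'return' was taken
def pvFillW (sym : Char) (h : Int) : List Int → List (List Char) → Int → (List (List Char) × Int × Bool)
  | [], g, num => (g, num, false)
  | w :: ws, g, num =>
      if num > 0 then pvFillW sym h ws (pvSet2 g h w sym) (num - 1)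
      else (g, num, true)

-- outer loop 'for h in range(start, end, 2): ...' of fill
def pvFillH (sym : Char) : List Int → List (List Char) → Int → List (List Char)
  | [], g, _ => g
  | h :: hs, g, num =>
      match pvFillW sym h (PySem.List.pyRange 1 100 2) g num with
      | (g', num', stop) => if stop then g' else pvFillH sym hs g' num'

def d_grid_components (A : Int) (B : Int) : String :=
  let grid := List.replicate 50 (List.replicate 100 '#') ++ List.replicate 50 (List.replicate 100 '.')
  let g1 := pvFillH '.' (PySem.List.pyRange 1 50 2) grid (A - 1)
  let g2 := pvFillH '#' (PySem.List.pyRange 51 100 2) g1 (B - 1)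
  "100 100\n" ++ String.intercalate "\n" (g2.map (fun row => String.mk row))

-- ===== PORT B =====
-- the loop body of half(): two appended rows per iteration, num decreasing by 50
def pvAltHalf (base sym : Char) : Nat → Int → List String
  | 0, _ => []
  | k + 1, num =>
      String.mk (List.replicate 100 base) ::
      String.mk (List.flatten (List.replicate (min (max num 0) 50).toNat [base, sym]) ++
                 List.replicate (100 - 2 * (min (max num 0) 50).toNat) base) ::
      pvAltHalf base sym k (num - 50)

def d_grid_components_alt (A : Int) (B : Int) : String :=
  "100 100\n" ++ String.intercalate "\n" (pvAltHalf '#' '.' 25 (A - 1) ++ pvAltHalf '.' '#' 25 (B - 1))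

-- ===== PRECONDITION & SPEC =====
def Spec_d_grid_components (A : Int) (B : Int) (out : String) : Prop := out = d_grid_components_alt A B
instance (A : Int) (B : Int) (out : String) : Decidable (Spec_d_grid_components A B out) := by unfold Spec_d_grid_components; infer_instance

-- ===== CLAIM (what is proved, stated in full; the proofs are below) =====
def Claim_equal_d_grid_components : Prop := ∀ (A : Int) (B : Int), Dom_d_grid_components A B → Spec_d_grid_components A B (d_grid_components A B)

-- ===== LEMMAS AND PROOFS =====

theorem pv_rep_two (k : Nat) (r : List Char) :
    List.replicate (2 * (k + 1)) r = r :: r :: List.replicate (2 * k) r := by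
  have h : 2 * (k + 1) = 2 * k + 1 + 1 := by omega
  rw [h]
  rfl

theorem pv_modify_append_one : ∀ (pre : List (List Char)) (a b : List Char) (rest : List (List Char))
    (f : List Char → List Char),
    (pre ++ a :: b :: rest).modify (pre.length + 1) f = pre ++ a :: f b :: rest := by
  intro pre
  induction pre with
  | nil =>
    intro a b rest f
    simp only [List.nil_append, List.length_nil, Nat.zero_add]
    rw [List.modify_succ_cons, List.modify_zero_cons]
  | cons x pre ih =>
    intro a b rest f
    simp only [List.cons_append, List.length_cons]
    rw [List.modify_succ_cons, ih]

-- per-row placement count of the inner loop, clamped to [0, |ws|]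
def pvClamp (num : Int) (n : Nat) : Nat := (min (max num 0) (n : Int)).toNat

theorem pvFillW_spec (sym : Char) (h : Int) : ∀ (ws : List Int) (g : List (List Char)) (num : Int),
    pvFillW sym h ws g num =
      (g.modify h.toNat (fun row => (ws.take (pvClamp num ws.length)).foldl (fun r w => r.set w.toNat sym) row),
       num - (pvClamp num ws.length : Int),
       decide (ws ≠ [] ∧ num < (ws.length : Int))) := by
  intro ws
  induction ws with
  | nil =>
    intro g num
    have hc : pvClamp num 0 = 0 := by unfold pvClamp; omega
    have h1 : pvFillW sym h [] g num = (g, num, false) := rfl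
    rw [h1]
    simp only [List.length_nil, hc, List.take_nil, List.foldl_nil,
      Nat.cast_zero, sub_zero, Prod.mk.injEq]
    refine ⟨(List.modify_id _ _).symm, trivial, by simp⟩
  | cons w ws ih =>
    intro g num
    by_cases hp : num > 0
    · have hc : pvClamp num (w :: ws).length = pvClamp (num - 1) ws.length + 1 := by
        unfold pvClamp; simp only [List.length_cons]; omega
      have h1 : pvFillW sym h (w :: ws) g num
          = pvFillW sym h ws (pvSet2 g h w sym) (num - 1) := by
        rw [pvFillW, if_pos hp]
      rw [h1, ih, hc]
      simp only [Prod.mk.injEq]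
      refine ⟨?_, ?_, ?_⟩
      · simp only [pvSet2, List.modify_modify_eq]
        rfl
      · push_cast; ring
      · rw [decide_eq_decide]
        cases ws with
        | nil => simp; omega
        | cons y ys => simp only [List.length_cons, ne_eq]; push_cast; simp; try omega
    · have hc : pvClamp num (w :: ws).length = 0 := by unfold pvClamp; omega
      have h1 : pvFillW sym h (w :: ws) g num = (g, num, true) := by
        rw [pvFillW, if_neg hp]
      rw [h1, hc]
      simp only [List.take_zero, List.foldl_nil, Nat.cast_zero, sub_zero,
        Prod.mk.injEq]
      refine ⟨(List.modify_id _ _).symm, trivial, ?_⟩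
      symm
      rw [decide_eq_true_iff]
      refine ⟨by simp, ?_⟩
      simp only [List.length_cons]
      push_cast
      omega

-- the char-level contents of one half, 25 (plain row, filled row) pairs
def pvRowOf (base sym : Char) (c : Nat) : List Char :=
  List.flatten (List.replicate c [base, sym]) ++ List.replicate (100 - 2 * c) base

def pvSRows (base sym : Char) : Nat → Int → List (List Char)
  | 0, _ => []
  | k + 1, num =>
      List.replicate 100 base :: pvRowOf base sym (pvClamp num 50) :: pvSRows base sym k (num - 50)

theorem pvSRows_length (base sym : Char) : ∀ (k : Nat) (num : Int), (pvSRows base sym k num).length = 2 * k := by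
  intro k
  induction k with
  | zero => intro num; rfl
  | succ k ih => intro num; simp [pvSRows, ih]; omega

theorem pvRowOf_zero (base sym : Char) : pvRowOf base sym 0 = List.replicate 100 base := by
  simp [pvRowOf]

theorem pvSRows_nonpos (base sym : Char) : ∀ (k : Nat) (num : Int), num ≤ 0 →
    pvSRows base sym k num = List.replicate (2 * k) (List.replicate 100 base) := by
  intro k
  induction k with
  | zero => intro num _; rfl
  | succ k ih =>
    intro num hn
    have hc : pvClamp num 50 = 0 := by unfold pvClamp; omega
    rw [pvSRows, hc, pvRowOf_zero, ih (num - 50) (by omega), pv_rep_two]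

theorem pvAltHalf_eq_sRows (base sym : Char) : ∀ (k : Nat) (num : Int),
    pvAltHalf base sym k num = (pvSRows base sym k num).map String.mk := by
  intro k
  induction k with
  | zero => intro num; rfl
  | succ k ih => intro num; simp [pvAltHalf, pvSRows, pvRowOf, pvClamp, ih]

-- index lists [L+1, L+3, …, L+2k-1]
def pvIdx : Nat → Nat → List Int
  | 0, _ => []
  | k + 1, L => ((L : Int) + 1) :: pvIdx k (L + 2)

theorem pvIdx_range1 : PySem.List.pyRange 1 50 2 = pvIdx 25 0 := by decide
theorem pvIdx_range2 : PySem.List.pyRange 51 100 2 = pvIdx 25 50 := by decide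

theorem pv_row_patch : ∀ base sym : Char, (base = '#' ∧ sym = '.') ∨ (base = '.' ∧ sym = '#') →
    ∀ c : Nat, c < 51 →
    ((PySem.List.pyRange 1 100 2).take c).foldl (fun r w => r.set w.toNat sym) (List.replicate 100 base)
      = pvRowOf base sym c := by
  intro base sym hbs c hc
  rcases hbs with ⟨hb, hs⟩ | ⟨hb, hs⟩ <;> subst hb <;> subst hs <;>
    revert c <;> · intro c; revert c; unfold pvRowOf; decide

theorem pv_core (base sym : Char) (hbs : (base = '#' ∧ sym = '.') ∨ (base = '.' ∧ sym = '#')) :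
    ∀ (k : Nat) (pre post : List (List Char)) (num : Int),
    pvFillH sym (pvIdx k pre.length) (pre ++ List.replicate (2 * k) (List.replicate 100 base) ++ post) num
      = pre ++ pvSRows base sym k num ++ post := by
  intro k
  induction k with
  | zero => intro pre post num; simp [pvIdx, pvFillH, pvSRows]
  | succ k ih =>
    intro pre post num
    have hlen : (PySem.List.pyRange 1 100 2).length = 50 := by decide
    have hne : (PySem.List.pyRange 1 100 2) ≠ [] := by decide
    have hgrid : pre ++ List.replicate (2 * (k + 1)) (List.replicate 100 base) ++ post
        = pre ++ List.replicate 100 base :: List.replicate 100 base ::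
            (List.replicate (2 * k) (List.replicate 100 base) ++ post) := by
      rw [pv_rep_two]; simp
    have htoNat : ((pre.length : Int) + 1).toNat = pre.length + 1 := by omega
    have hcle : pvClamp num 50 < 51 := by unfold pvClamp; omega
    rw [pvIdx, pvFillH, hgrid, pvFillW_spec, hlen, htoNat, pv_modify_append_one,
        pv_row_patch base sym hbs _ hcle]
    simp only [hne, ne_eq, not_false_eq_true, true_and, decide_eq_true_eq]
    by_cases hstop : num < (50 : Int)
    · rw [if_pos (by push_cast; omega)]
      rw [pvSRows, pvSRows_nonpos base sym k (num - 50) (by omega)]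
      simp
    · rw [if_neg (by push_cast; omega)]
      have hnum : num - (pvClamp num 50 : Int) = num - 50 := by unfold pvClamp; omega
      have hpre : (pre ++ [List.replicate 100 base, pvRowOf base sym (pvClamp num 50)]).length
          = pre.length + 2 := by simp
      have hih := ih (pre ++ [List.replicate 100 base, pvRowOf base sym (pvClamp num 50)]) post (num - 50)
      rw [hpre] at hih
      rw [hnum]
      calc pvFillH sym (pvIdx k (pre.length + 2))
            (pre ++ List.replicate 100 base :: pvRowOf base sym (pvClamp num 50) ::
              (List.replicate (2 * k) (List.replicate 100 base) ++ post)) (num - 50)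
          = pvFillH sym (pvIdx k (pre.length + 2))
            ((pre ++ [List.replicate 100 base, pvRowOf base sym (pvClamp num 50)]) ++
              List.replicate (2 * k) (List.replicate 100 base) ++ post) (num - 50) := by simp
        _ = (pre ++ [List.replicate 100 base, pvRowOf base sym (pvClamp num 50)]) ++
              pvSRows base sym k (num - 50) ++ post := hih
        _ = pre ++ pvSRows base sym (k + 1) num ++ post := by simp [pvSRows]

-- ===== VERDICT (by name: the statement is the Claim_ definition above) =====
theorem d_grid_components_spec : Claim_equal_d_grid_components := by
  intro A B _
  show "100 100\n" ++ String.intercalate "\n"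
      ((pvFillH '#' (PySem.List.pyRange 51 100 2)
        (pvFillH '.' (PySem.List.pyRange 1 50 2)
          (List.replicate 50 (List.replicate 100 '#') ++ List.replicate 50 (List.replicate 100 '.'))
          (A - 1)) (B - 1)).map (fun row => String.mk row))
    = d_grid_components_alt A B
  have e50 : (2 : Nat) * 25 = 50 := by norm_num
  have h1 := pv_core '#' '.' (Or.inl ⟨rfl, rfl⟩) 25 []
      (List.replicate 50 (List.replicate 100 '.')) (A - 1)
  have h2 := pv_core '.' '#' (Or.inr ⟨rfl, rfl⟩) 25 (pvSRows '#' '.' 25 (A - 1)) [] (B - 1)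
  rw [pvSRows_length] at h2
  rw [e50] at h1 h2
  simp only [List.length_nil, List.append_nil, List.nil_append] at h1 h2
  rw [pvIdx_range1, pvIdx_range2, h1, h2]
  unfold d_grid_components_alt
  simp [pvAltHalf_eq_sRows]
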